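-- pv_equiv track=rewrite | github.com/antoyneGG/UVa_Solutions | Python/homer.py | phiHomer
-- ===== SOURCE A (Python) =====
-- def newMax(tup1, tup2):
--     if(tup1[1] < tup2[1]):
--         return tup1
--     elif(tup1[1] > tup2[1]):
--         return tup2
--     else:
--         if(tup1[0] >= tup2[0]):
--             return tup1
--         else:
--             return tup2
--
-- def phiHomer(m, n, t, mem):
--     if(t in mem.keys()):
--         ans = mem[t]
--         return ans
--     if(t < n and t < m):
--         mem[t] = (0, t)
--         return (0, t)
--     else:
--         if(t >= n and t >= m):
--             ans = tuple([sum(x) for x in zip((1, 0), newMax(phiHomer(m, n, t - n, mem), phiHomer(m, n, t - m, mem)))])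
--         elif(t >= n):
--             ans = tuple([sum(x) for x in zip((1, 0), phiHomer(m, n, t - n, mem))])
--         else:
--             ans = tuple([sum(x) for x in zip((1, 0), phiHomer(m, n, t - m, mem))])
--         mem[t] = ans
--         return ans
-- ===== SOURCE B (Python) =====
-- def newMax(tup1, tup2):
--     if(tup1[1] < tup2[1]):
--         return tup1
--     elif(tup1[1] > tup2[1]):
--         return tup2
--     else:
--         if(tup1[0] >= tup2[0]):
--             return tup1
--         else:
--             return tup2
--
-- def phiHomer(m, n, t, mem):
--     # NOTE: equivalence is about the return value; A fills mem with every index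
--     # its recursion reaches, while B only stores the final answer at t.
--     if t in mem:
--         return mem[t]
--     if t < n and t < m:
--         mem[t] = (0, t)
--         return (0, t)
--     dp = []
--     for i in range(t + 1):
--         if i in mem:
--             val = mem[i]
--         elif i < n and i < m:
--             val = (0, i)
--         elif i >= n and i >= m:
--             best = newMax(dp[i - n], dp[i - m])
--             val = (1 + best[0], 0 + best[1])
--         elif i >= n:
--             val = (1 + dp[i - n][0], 0 + dp[i - n][1])
--         else:
--             val = (1 + dp[i - m][0], 0 + dp[i - m][1])
--         dp.append(val)
--     mem[t] = dp[t]
--     return dp[t]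
-- ===== Notes on version B (the rewrite author's own statement) =====
-- stated objective: alternative
-- what changed: Replaced the top-down memoized recursion (which threads and mutates the mem dict) by an iterative bottom-up DP table filled from 0 to t, keeping the direct-return cases and the newMax tie-break unchanged.
-- outside the precondition, e.g. on phiHomer(-1, 2, 1, {0: (1, 0), 3: (2, 0)}): A returns (4, 0), B raises IndexError
import Mathlib
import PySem

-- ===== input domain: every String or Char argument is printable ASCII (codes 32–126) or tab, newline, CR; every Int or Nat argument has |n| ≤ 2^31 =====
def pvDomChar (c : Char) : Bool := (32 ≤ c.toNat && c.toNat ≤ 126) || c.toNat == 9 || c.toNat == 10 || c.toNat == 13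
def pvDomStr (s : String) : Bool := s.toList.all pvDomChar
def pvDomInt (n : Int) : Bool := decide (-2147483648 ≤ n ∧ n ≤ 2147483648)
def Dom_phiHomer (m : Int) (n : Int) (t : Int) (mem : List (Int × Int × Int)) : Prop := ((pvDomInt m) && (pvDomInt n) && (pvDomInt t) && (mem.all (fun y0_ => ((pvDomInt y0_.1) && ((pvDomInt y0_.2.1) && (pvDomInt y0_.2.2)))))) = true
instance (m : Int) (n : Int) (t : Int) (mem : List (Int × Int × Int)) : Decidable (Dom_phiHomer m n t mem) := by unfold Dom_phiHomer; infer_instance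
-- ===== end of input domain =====

-- B replaces A's top-down memoized recursion by an iterative bottom-up table
-- (objective: alternative decomposition). Equivalence is about the RETURN value
-- only: A mutates mem at every reached index, B only stores the answer at t.

-- ===== PORT A =====
def newMaxA (tup1 tup2 : Int × Int) : Int × Int :=
  if tup1.2 < tup2.2 then tup1
  else if tup1.2 > tup2.2 then tup2
  else if tup1.1 ≥ tup2.1 then tup1 else tup2

-- state-passing transliteration of A's recursion; fuel only makes it total
-- (under Pre_ the initial fuel t.toNat + 1 is never exhausted)
def phiHomerA (m n : Int) : Nat → Int → PySem.Dict Int (Int × Int) → (Int × Int) × PySem.Dict Int (Int × Int)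
  | 0, _, mem => ((0, 0), mem)
  | fuel+1, t, mem =>
    match mem.get? t with
    | some v => (v, mem)
    | none =>
      if t < n ∧ t < m then ((0, t), mem.insert t (0, t))
      else if t ≥ n ∧ t ≥ m then
        let r1 := phiHomerA m n fuel (t - n) mem
        let r2 := phiHomerA m n fuel (t - m) r1.2
        let b := newMaxA r1.1 r2.1
        let ans := (1 + b.1, 0 + b.2)
        (ans, r2.2.insert t ans)
      else if t ≥ n then
        let r1 := phiHomerA m n fuel (t - n) mem
        let ans := (1 + r1.1.1, 0 + r1.1.2)
        (ans, r1.2.insert t ans)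
      else
        let r1 := phiHomerA m n fuel (t - m) mem
        let ans := (1 + r1.1.1, 0 + r1.1.2)
        (ans, r1.2.insert t ans)

def phiHomer (m : Int) (n : Int) (t : Int) (mem : List (Int × Int × Int)) : Int × Int :=
  (phiHomerA m n (t.toNat + 1) t (PySem.Dict.ofList mem)).1

-- ===== PORT B =====
def newMaxB (tup1 tup2 : Int × Int) : Int × Int :=
  if tup1.2 < tup2.2 then tup1
  else if tup1.2 > tup2.2 then tup2
  else if tup1.1 ≥ tup2.1 then tup1 else tup2

-- one iteration of B's for-loop (dp[i-n] / dp[i-m] ported with pyGetD: the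
-- index is always in range when the loop runs, so the default is never used)
def altStep (m n : Int) (mem0 : PySem.Dict Int (Int × Int)) (dp : List (Int × Int)) (i : Int) : List (Int × Int) :=
  let val :=
    match mem0.get? i with
    | some v => v
    | none =>
      if i < n ∧ i < m then (0, i)
      else if i ≥ n ∧ i ≥ m then
        let b := newMaxB (PySem.List.pyGetD dp (i - n) (0, 0)) (PySem.List.pyGetD dp (i - m) (0, 0))
        (1 + b.1, 0 + b.2)
      else if i ≥ n then
        let a := PySem.List.pyGetD dp (i - n) (0, 0)
        (1 + a.1, 0 + a.2)
      else
        let a := PySem.List.pyGetD dp (i - m) (0, 0)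
        (1 + a.1, 0 + a.2)
  dp ++ [val]

def phiHomer_alt (m : Int) (n : Int) (t : Int) (mem : List (Int × Int × Int)) : Int × Int :=
  let mem0 : PySem.Dict Int (Int × Int) := PySem.Dict.ofList mem
  match mem0.get? t with
  | some v => v
  | none =>
    if t < n ∧ t < m then (0, t)
    else
      let dp := (PySem.List.pyRange 0 (t + 1) 1).foldl (altStep m n mem0) []
      PySem.List.pyGetD dp t (0, 0)

-- ===== PRECONDITION & SPEC =====
-- Pre_ excludes inputs with a non-positive stroke value n or m that are not
-- settled by a direct lookup or the base case: there A's recursion does not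
-- shrink t and terminates (if at all) only through accidental memo hits, while
-- B's bottom-up table indexes out of range (IndexError).
def Pre_phiHomer (m : Int) (n : Int) (t : Int) (mem : List (Int × Int × Int)) : Prop :=
  ((PySem.Dict.ofList mem).get? t).isSome = true ∨ (t < n ∧ t < m) ∨ (1 ≤ m ∧ 1 ≤ n)
instance (m : Int) (n : Int) (t : Int) (mem : List (Int × Int × Int)) : Decidable (Pre_phiHomer m n t mem) := by unfold Pre_phiHomer; infer_instance

def pvWitness_phiHomer : Int × Int × Int × (List (Int × Int × Int)) := (3, 2, 10, [(4, (1, 0))])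

def Spec_phiHomer (m : Int) (n : Int) (t : Int) (mem : List (Int × Int × Int)) (out : Int × Int) : Prop := out = phiHomer_alt m n t mem
instance (m : Int) (n : Int) (t : Int) (mem : List (Int × Int × Int)) (out : Int × Int) : Decidable (Spec_phiHomer m n t mem out) := by unfold Spec_phiHomer; infer_instance

-- ===== CLAIM (what is proved, stated in full; the proofs are below) =====
def Claim_equal_phiHomer : Prop := ∀ (m : Int) (n : Int) (t : Int) (mem : List (Int × Int × Int)), Dom_phiHomer m n t mem → Pre_phiHomer m n t mem → Spec_phiHomer m n t mem (phiHomer m n t mem)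

-- ===== LEMMAS AND PROOFS =====

-- the pure value function both programs compute (proof device, used by no port)
def pvF (m n : Int) (mem0 : PySem.Dict Int (Int × Int)) : Nat → Int → Int × Int
  | 0, _ => (0, 0)
  | fuel+1, t =>
    match mem0.get? t with
    | some v => v
    | none =>
      if t < n ∧ t < m then (0, t)
      else if t ≥ n ∧ t ≥ m then
        let b := newMaxA (pvF m n mem0 fuel (t - n)) (pvF m n mem0 fuel (t - m))
        (1 + b.1, 0 + b.2)
      else if t ≥ n then
        let r := pvF m n mem0 fuel (t - n)
        (1 + r.1, 0 + r.2)
      else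
        let r := pvF m n mem0 fuel (t - m)
        (1 + r.1, 0 + r.2)

def pvFs (m n : Int) (mem0 : PySem.Dict Int (Int × Int)) (t : Int) : Int × Int :=
  pvF m n mem0 (t.toNat + 1) t

theorem pvF_irrel (m n : Int) (mem0 : PySem.Dict Int (Int × Int)) (hm : 1 ≤ m) (hn : 1 ≤ n) :
    ∀ (k : Nat) (t : Int), t.toNat ≤ k → ∀ f1 f2 : Nat, t.toNat + 1 ≤ f1 → t.toNat + 1 ≤ f2 →
      pvF m n mem0 f1 t = pvF m n mem0 f2 t := by
  intro k
  induction k with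
  | zero =>
    intro t ht f1 f2 hf1 hf2
    obtain ⟨f1', rfl⟩ : ∃ f, f1 = f + 1 := ⟨f1 - 1, by omega⟩
    obtain ⟨f2', rfl⟩ : ∃ f, f2 = f + 1 := ⟨f2 - 1, by omega⟩
    have h1 : t < n ∧ t < m := by constructor <;> omega
    simp only [pvF]
    cases mem0.get? t with
    | some v => rfl
    | none => simp [h1]
  | succ k ih =>
    intro t ht f1 f2 hf1 hf2
    obtain ⟨f1', rfl⟩ : ∃ f, f1 = f + 1 := ⟨f1 - 1, by omega⟩
    obtain ⟨f2', rfl⟩ : ∃ f, f2 = f + 1 := ⟨f2 - 1, by omega⟩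
    simp only [pvF]
    cases mem0.get? t with
    | some v => rfl
    | none =>
      by_cases hb : t < n ∧ t < m
      · simp [hb]
      · have hrn : t ≥ n → pvF m n mem0 f1' (t - n) = pvF m n mem0 f2' (t - n) :=
          fun h => ih (t - n) (by omega) f1' f2' (by omega) (by omega)
        have hrm : t ≥ m → pvF m n mem0 f1' (t - m) = pvF m n mem0 f2' (t - m) :=
          fun h => ih (t - m) (by omega) f1' f2' (by omega) (by omega)
        by_cases h2 : t ≥ n ∧ t ≥ m
        · simp [hb, h2, hrn h2.1, hrm h2.2]
        · by_cases h3 : t ≥ n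
          · have h5 : ¬ (m ≤ t) := fun h => h2 ⟨h3, h⟩
            simp [hb, h3, h5, hrn h3]
          · have h4 : t ≥ m := by omega
            simp [hb, h3, h4, hrm h4]

theorem pvF_eq_pvFs (m n : Int) (mem0 : PySem.Dict Int (Int × Int)) (hm : 1 ≤ m) (hn : 1 ≤ n)
    (f : Nat) (t : Int) (hf : t.toNat + 1 ≤ f) : pvF m n mem0 f t = pvFs m n mem0 t :=
  pvF_irrel m n mem0 hm hn t.toNat t le_rfl f (t.toNat + 1) hf le_rfl

theorem pvFs_base (m n : Int) (mem0 : PySem.Dict Int (Int × Int)) (t : Int)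
    (h0 : mem0.get? t = none) (hb : t < n ∧ t < m) : pvFs m n mem0 t = (0, t) := by
  show pvF m n mem0 (t.toNat + 1) t = (0, t)
  simp [pvF, h0, hb]

theorem pvFs_both (m n : Int) (mem0 : PySem.Dict Int (Int × Int)) (t : Int)
    (hm : 1 ≤ m) (hn : 1 ≤ n) (h0 : mem0.get? t = none) (hn' : n ≤ t) (hm' : m ≤ t) :
    pvFs m n mem0 t = (1 + (newMaxA (pvFs m n mem0 (t - n)) (pvFs m n mem0 (t - m))).1,
      0 + (newMaxA (pvFs m n mem0 (t - n)) (pvFs m n mem0 (t - m))).2) := by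
  show pvF m n mem0 (t.toNat + 1) t = _
  simp only [pvF, h0]
  rw [if_neg (show ¬ (t < n ∧ t < m) by omega), if_pos (show t ≥ n ∧ t ≥ m from ⟨hn', hm'⟩)]
  rw [pvF_eq_pvFs m n mem0 hm hn t.toNat (t - n) (by omega),
      pvF_eq_pvFs m n mem0 hm hn t.toNat (t - m) (by omega)]

theorem pvFs_onlyn (m n : Int) (mem0 : PySem.Dict Int (Int × Int)) (t : Int)
    (hm : 1 ≤ m) (hn : 1 ≤ n) (h0 : mem0.get? t = none) (hn' : n ≤ t) (hm' : ¬ m ≤ t) :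
    pvFs m n mem0 t = (1 + (pvFs m n mem0 (t - n)).1, 0 + (pvFs m n mem0 (t - n)).2) := by
  show pvF m n mem0 (t.toNat + 1) t = _
  simp only [pvF, h0]
  rw [if_neg (show ¬ (t < n ∧ t < m) by omega), if_neg (show ¬ (t ≥ n ∧ t ≥ m) by omega),
      if_pos (show t ≥ n from hn')]
  rw [pvF_eq_pvFs m n mem0 hm hn t.toNat (t - n) (by omega)]

theorem pvFs_onlym (m n : Int) (mem0 : PySem.Dict Int (Int × Int)) (t : Int)
    (hm : 1 ≤ m) (hn : 1 ≤ n) (h0 : mem0.get? t = none) (hn' : ¬ n ≤ t) (hm' : m ≤ t) :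
    pvFs m n mem0 t = (1 + (pvFs m n mem0 (t - m)).1, 0 + (pvFs m n mem0 (t - m)).2) := by
  show pvF m n mem0 (t.toNat + 1) t = _
  simp only [pvF, h0]
  rw [if_neg (show ¬ (t < n ∧ t < m) by omega), if_neg (show ¬ (t ≥ n ∧ t ≥ m) by omega),
      if_neg (show ¬ t ≥ n from hn')]
  rw [pvF_eq_pvFs m n mem0 hm hn t.toNat (t - m) (by omega)]

-- the memo invariant A's state satisfies
def pvInv (m n : Int) (mem0 mem : PySem.Dict Int (Int × Int)) : Prop :=
  (∀ k v, mem0.get? k = some v → mem.get? k = some v) ∧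
  (∀ k v, mem.get? k = some v → v = pvFs m n mem0 k)

theorem pvInv_insert (m n : Int) (mem0 mem : PySem.Dict Int (Int × Int)) (t : Int) (ans : Int × Int)
    (hinv : pvInv m n mem0 mem) (h0 : mem0.get? t = none) (hans : ans = pvFs m n mem0 t) :
    pvInv m n mem0 (mem.insert t ans) := by
  constructor
  · intro k v h0k
    by_cases hk : k = t
    · subst hk; rw [h0k] at h0; cases h0
    · rw [PySem.Dict.get?_insert_of_ne mem ans hk]; exact hinv.1 k v h0k
  · intro k v h
    by_cases hk : k = t
    · subst hk; rw [PySem.Dict.get?_insert_self] at h; cases h; exact hans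
    · rw [PySem.Dict.get?_insert_of_ne mem ans hk] at h; exact hinv.2 k v h

theorem phiHomerA_correct (m n : Int) (mem0 : PySem.Dict Int (Int × Int)) (hm : 1 ≤ m) (hn : 1 ≤ n) :
    ∀ (fuel : Nat) (t : Int) (mem : PySem.Dict Int (Int × Int)), t.toNat + 1 ≤ fuel →
      pvInv m n mem0 mem →
      (phiHomerA m n fuel t mem).1 = pvFs m n mem0 t ∧ pvInv m n mem0 (phiHomerA m n fuel t mem).2 := by
  intro fuel
  induction fuel with
  | zero => intro t mem hf hinv; omega
  | succ fuel ih =>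
    intro t mem hf hinv
    simp only [phiHomerA]
    cases hmem : mem.get? t with
    | some v => exact ⟨hinv.2 t v hmem, hinv⟩
    | none =>
      have h0 : mem0.get? t = none := by
        cases h : mem0.get? t with
        | none => rfl
        | some w => rw [hinv.1 t w h] at hmem; cases hmem
      by_cases hb : t < n ∧ t < m
      · refine ⟨?_, ?_⟩
        · simp only [if_pos hb]
          exact (pvFs_base m n mem0 t h0 hb).symm
        · simp only [if_pos hb]
          exact pvInv_insert m n mem0 mem t (0, t) hinv h0 (pvFs_base m n mem0 t h0 hb).symm
      · by_cases h2 : t ≥ n ∧ t ≥ m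
        · have IH1 := ih (t - n) mem (by omega) hinv
          have IH2 := ih (t - m) (phiHomerA m n fuel (t - n) mem).2 (by omega) IH1.2
          have hv : (1 + (newMaxA ((phiHomerA m n fuel (t - n) mem).1)
              ((phiHomerA m n fuel (t - m) (phiHomerA m n fuel (t - n) mem).2).1)).1,
              0 + (newMaxA ((phiHomerA m n fuel (t - n) mem).1)
              ((phiHomerA m n fuel (t - m) (phiHomerA m n fuel (t - n) mem).2).1)).2) = pvFs m n mem0 t := by
            rw [IH1.1, IH2.1, pvFs_both m n mem0 t hm hn h0 h2.1 h2.2]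
          refine ⟨?_, ?_⟩
          · simp only [if_neg hb, if_pos h2]; exact hv
          · simp only [if_neg hb, if_pos h2]
            exact pvInv_insert m n mem0 _ t _ IH2.2 h0 hv
        · by_cases h3 : t ≥ n
          · have IH1 := ih (t - n) mem (by omega) hinv
            have hv : (1 + (phiHomerA m n fuel (t - n) mem).1.1, 0 + (phiHomerA m n fuel (t - n) mem).1.2) = pvFs m n mem0 t := by
              rw [IH1.1, pvFs_onlyn m n mem0 t hm hn h0 h3 (fun h => h2 ⟨h3, h⟩)]
            refine ⟨?_, ?_⟩
            · simp only [if_neg hb, if_neg h2, if_pos h3]; exact hv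
            · simp only [if_neg hb, if_neg h2, if_pos h3]
              exact pvInv_insert m n mem0 _ t _ IH1.2 h0 hv
          · have h4 : t ≥ m := by omega
            have IH1 := ih (t - m) mem (by omega) hinv
            have hv : (1 + (phiHomerA m n fuel (t - m) mem).1.1, 0 + (phiHomerA m n fuel (t - m) mem).1.2) = pvFs m n mem0 t := by
              rw [IH1.1, pvFs_onlym m n mem0 t hm hn h0 h3 h4]
            refine ⟨?_, ?_⟩
            · simp only [if_neg hb, if_neg h2, if_neg h3]; exact hv
            · simp only [if_neg hb, if_neg h2, if_neg h3]
              exact pvInv_insert m n mem0 _ t _ IH1.2 h0 hv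

theorem pvFs_mem (m n : Int) (mem0 : PySem.Dict Int (Int × Int)) (t : Int) (v : Int × Int)
    (h : mem0.get? t = some v) : pvFs m n mem0 t = v := by
  show pvF m n mem0 (t.toNat + 1) t = v
  simp [pvF, h]

theorem newMaxB_eq (a b : Int × Int) : newMaxB a b = newMaxA a b := rfl

theorem altLoop_correct (m n : Int) (mem0 : PySem.Dict Int (Int × Int)) (hm : 1 ≤ m) (hn : 1 ≤ n) :
    ∀ (j : Nat),
      ((PySem.List.pyRange 0 (j : Int) 1).foldl (altStep m n mem0) []).length = j ∧
      ∀ i : Nat, i < j →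
        ((PySem.List.pyRange 0 (j : Int) 1).foldl (altStep m n mem0) [])[i]? = some (pvFs m n mem0 (i : Int)) := by
  intro j
  induction j with
  | zero =>
    refine ⟨?_, ?_⟩
    · rw [PySem.List.pyRange_one_eq_nil (by omega)]; rfl
    · intro i hi; omega
  | succ j ih =>
    have hsplit : PySem.List.pyRange 0 ((j + 1 : Nat) : Int) 1
        = PySem.List.pyRange 0 (j : Int) 1 ++ [(j : Int)] := by
      have h := PySem.List.pyRange_one_succ_right (a := 0) (b := (j : Int)) (by omega)
      push_cast
      exact h
    rw [hsplit, List.foldl_append]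
    have hlen : ((PySem.List.pyRange 0 (j : Int) 1).foldl (altStep m n mem0) []).length = j := ih.1
    have hget := ih.2
    set dp := (PySem.List.pyRange 0 (j : Int) 1).foldl (altStep m n mem0) [] with hdp
    have hlook : ∀ s : Int, 1 ≤ s → s ≤ (j : Int) →
        PySem.List.pyGetD dp ((j : Int) - s) (0, 0) = pvFs m n mem0 ((j : Int) - s) := by
      intro s hs1 hs2
      have h2 : ((j : Int) - s) < (dp.length : Int) := by omega
      rw [PySem.List.pyGetD_eq_getElem dp (0, 0) (by omega) h2]
      have h3 : ((j : Int) - s).toNat < j := by omega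
      have h5 := hget _ h3
      rw [List.getElem?_eq_getElem (by omega)] at h5
      have h4 : ((((j : Int) - s).toNat : Nat) : Int) = (j : Int) - s := by omega
      rw [h4] at h5
      exact Option.some.inj h5
    have hval : altStep m n mem0 dp (j : Int) = dp ++ [pvFs m n mem0 (j : Int)] := by
      simp only [altStep]
      congr 1
      cases h : mem0.get? (j : Int) with
      | some v => simp [pvFs_mem m n mem0 _ v h]
      | none =>
        by_cases hb : (j : Int) < n ∧ (j : Int) < m
        · simp [hb, pvFs_base m n mem0 _ h hb]
        · by_cases h2 : (j : Int) ≥ n ∧ (j : Int) ≥ m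
          · simp only [if_neg hb, if_pos h2]
            rw [hlook n hn (by omega), hlook m hm (by omega), newMaxB_eq,
                pvFs_both m n mem0 _ hm hn h h2.1 h2.2]
          · by_cases h3 : (j : Int) ≥ n
            · simp only [if_neg hb, if_neg h2, if_pos h3]
              rw [hlook n hn (by omega),
                  pvFs_onlyn m n mem0 _ hm hn h h3 (fun hh => h2 ⟨h3, hh⟩)]
            · have h4 : (j : Int) ≥ m := by omega
              simp only [if_neg hb, if_neg h2, if_neg h3]
              rw [hlook m hm (by omega), pvFs_onlym m n mem0 _ hm hn h h3 h4]
    simp only [List.foldl_cons, List.foldl_nil]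
    rw [hval]
    refine ⟨by simp [hlen], ?_⟩
    intro i hi
    by_cases hij : i < j
    · rw [List.getElem?_append_left (by omega)]
      exact hget i hij
    · have hij' : i = j := by omega
      subst hij'
      rw [List.getElem?_append_right (by omega)]
      simp [hlen]

-- ===== VERDICT (by name: the statement is the Claim_ definition above) =====
theorem phiHomer_spec : Claim_equal_phiHomer := by
  intro m n t mem hdom hpre
  unfold Spec_phiHomer phiHomer phiHomer_alt
  simp only []
  cases hmem : (PySem.Dict.ofList mem : PySem.Dict Int (Int × Int)).get? t with
  | some v => simp [phiHomerA, hmem]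
  | none =>
    by_cases hb : t < n ∧ t < m
    · simp [phiHomerA, hmem, hb]
    · have hmn : 1 ≤ m ∧ 1 ≤ n := by
        rcases hpre with h | h | h
        · rw [hmem] at h; cases h
        · exact absurd h hb
        · exact h
      have hInv0 : pvInv m n (PySem.Dict.ofList mem) (PySem.Dict.ofList mem) :=
        ⟨fun k v h => h, fun k v h => (pvFs_mem m n _ k v h).symm⟩
      have hA := phiHomerA_correct m n (PySem.Dict.ofList mem) hmn.1 hmn.2 (t.toNat + 1) t
        (PySem.Dict.ofList mem) le_rfl hInv0
      rw [hA.1]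
      simp only [if_neg hb]
      have ht1 : 1 ≤ t := by omega
      have hcast : t + 1 = ((t.toNat + 1 : Nat) : Int) := by omega
      rw [hcast]
      have hB := altLoop_correct m n (PySem.Dict.ofList mem) hmn.1 hmn.2 (t.toNat + 1)
      set dp := (PySem.List.pyRange 0 ((t.toNat + 1 : Nat) : Int) 1).foldl
        (altStep m n (PySem.Dict.ofList mem)) [] with hdp
      have h2 : t < (dp.length : Int) := by
        rw [hB.1]; omega
      rw [PySem.List.pyGetD_eq_getElem dp (0, 0) (by omega) h2]
      have h5 := hB.2 t.toNat (by omega)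
      rw [List.getElem?_eq_getElem (by omega)] at h5
      have h4 : ((t.toNat : Nat) : Int) = t := by omega
      rw [h4] at h5
      exact (Option.some.inj h5).symm
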